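-- pv_equiv track=rewrite | github.com/sprumin/Mailprogramming | 2019-07-09_3.py | kaing_calander
-- ===== SOURCE A (Python) =====
-- def kaing_calander(M, N, x, y):
--     count = 1
--     year = [1, 1]
--
--     while year != [M, N]:
--         if year[0] < M:
--             year[0] = year[0] + 1
--         else:
--             year[0] = 1
--
--         if year[1] < N:
--             year[1] = year[1] + 1
--         else:
--             year[1] = 1
--
--         count += 1
--
--         if year == [x, y]:
--             break
--
--     if year != [x, y]:
--         count = -1
--
--     return count
-- ===== SOURCE B (Python) =====
-- def kaing_calander(M, N, x, y):
--     if not (1 <= x <= M and 1 <= y <= N):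
--         return -1
--     k = x
--     for _ in range(N):
--         if (k - y) % N == 0:
--             return k
--         k += M
--     return -1
-- ===== Notes on version B (the rewrite author's own statement) =====
-- stated objective: faster
-- what changed: B replaces A's day-by-day simulation of both cyclic counters (up to lcm(M,N) steps) by scanning only the arithmetic progression x, x+M, ... (at most N candidates) for one congruent to y mod N, after a range check on (x,y).
-- intended difference: On x=1, y=1 with (M,N) != (1,1), A returns -1 because it only tests (x,y) after the first increment and so never sees day 1; B returns 1, the intended first day of the calendar. — e.g. on kaing_calander(2, 3, 1, 1): A returns -1, B returns 1
-- outside the precondition, e.g. on kaing_calander(-2, 2, 1, 1): A returns 3, B returns -1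
import Mathlib
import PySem

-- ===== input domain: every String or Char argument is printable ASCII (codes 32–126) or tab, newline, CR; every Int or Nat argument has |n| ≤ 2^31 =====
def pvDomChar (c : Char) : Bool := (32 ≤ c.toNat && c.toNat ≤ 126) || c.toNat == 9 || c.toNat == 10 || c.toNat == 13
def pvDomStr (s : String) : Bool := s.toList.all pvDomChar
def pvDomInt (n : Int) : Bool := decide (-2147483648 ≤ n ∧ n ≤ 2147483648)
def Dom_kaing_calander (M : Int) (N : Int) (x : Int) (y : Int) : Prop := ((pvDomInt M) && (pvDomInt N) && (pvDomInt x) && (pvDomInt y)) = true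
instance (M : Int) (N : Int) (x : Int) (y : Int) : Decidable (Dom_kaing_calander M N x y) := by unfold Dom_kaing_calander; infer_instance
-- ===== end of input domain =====

-- B scans the arithmetic progression x, x+M, … (≤ N candidates) instead of simulating
-- every day up to lcm(M,N); it also returns 1 (not A's -1) for the first day (x,y)=(1,1).

-- ===== PORT A =====
-- A's while-loop, with fuel (the loop runs at most lcm(M,N) ≤ M*N steps when it terminates).
-- State: (count, year[0], year[1]).
def kaingLoopA (M N x y : Int) : Nat → Int → Int → Int → Int × Int × Int
  | 0, count, a, b => (count, a, b)
  | fuel+1, count, a, b =>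
    if a = M ∧ b = N then (count, a, b)        -- while year != [M, N]
    else
      let a' := if a < M then a + 1 else 1
      let b' := if b < N then b + 1 else 1
      let count' := count + 1
      if a' = x ∧ b' = y then (count', a', b') -- if year == [x, y]: break
      else kaingLoopA M N x y fuel count' a' b'

def kaing_calander (M : Int) (N : Int) (x : Int) (y : Int) : Int :=
  let r := kaingLoopA M N x y ((M*N).toNat + 1) 1 1 1
  if r.2.1 = x ∧ r.2.2 = y then r.1 else -1    -- if year != [x, y]: count = -1

-- ===== PORT B =====
-- B's for-loop over range(N): k runs over x, x+M, …
def kaingLoopB (M N y : Int) : Nat → Int → Int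
  | 0, _ => -1
  | n+1, k => if PySem.Int.mod (k - y) N = 0 then k else kaingLoopB M N y n (k + M)

def kaing_calander_alt (M : Int) (N : Int) (x : Int) (y : Int) : Int :=
  if 1 ≤ x ∧ x ≤ M ∧ 1 ≤ y ∧ y ≤ N then kaingLoopB M N y N.toNat x else -1

-- ===== PRECONDITION & SPEC =====
-- Pre_ excludes the unnatural cycle lengths M ≤ 0 or N ≤ 0, outside the calendar's domain: there A's
-- while-loop usually never terminates (a counter stuck at 1 never equals M or N), though it can still
-- return a count from the stuck counter when x = 1 or y = 1; B reports -1 for such inputs.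
def Pre_kaing_calander (M : Int) (N : Int) (x : Int) (y : Int) : Prop := 1 ≤ M ∧ 1 ≤ N
instance (M : Int) (N : Int) (x : Int) (y : Int) : Decidable (Pre_kaing_calander M N x y) := by unfold Pre_kaing_calander; infer_instance
def pvWitness_kaing_calander : Int × Int × Int × Int := (2, 3, 1, 2)

-- On x=1, y=1 with (M,N) ≠ (1,1), A returns -1 because it only tests (x,y) after the first
-- increment and so never sees day 1; B returns 1, the intended first day of the calendar.
def D_kaing_calander (M : Int) (N : Int) (x : Int) (y : Int) : Prop := x = 1 ∧ y = 1 ∧ ¬(M = 1 ∧ N = 1)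
instance (M : Int) (N : Int) (x : Int) (y : Int) : Decidable (D_kaing_calander M N x y) := by unfold D_kaing_calander; infer_instance

def Spec_kaing_calander (M : Int) (N : Int) (x : Int) (y : Int) (out : Int) : Prop := ¬ D_kaing_calander M N x y → out = kaing_calander_alt M N x y
instance (M : Int) (N : Int) (x : Int) (y : Int) (out : Int) : Decidable (Spec_kaing_calander M N x y out) := by unfold Spec_kaing_calander; infer_instance

def pvDiffWitness_kaing_calander : Int × Int × Int × Int := (2, 3, 1, 1)
def pvDiffWitnessOut_kaing_calander : Int × Int := (-1, 1)

-- ===== CLAIM (what is proved, stated in full; the proofs are below) =====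
def Claim_unchanged_kaing_calander : Prop := ∀ (M : Int) (N : Int) (x : Int) (y : Int), Dom_kaing_calander M N x y → Pre_kaing_calander M N x y → Spec_kaing_calander M N x y (kaing_calander M N x y)
def Claim_changed_kaing_calander : Prop := Dom_kaing_calander (pvDiffWitness_kaing_calander.1) (pvDiffWitness_kaing_calander.2.1) (pvDiffWitness_kaing_calander.2.2.1) (pvDiffWitness_kaing_calander.2.2.2) ∧ Pre_kaing_calander (pvDiffWitness_kaing_calander.1) (pvDiffWitness_kaing_calander.2.1) (pvDiffWitness_kaing_calander.2.2.1) (pvDiffWitness_kaing_calander.2.2.2) ∧ D_kaing_calander (pvDiffWitness_kaing_calander.1) (pvDiffWitness_kaing_calander.2.1) (pvDiffWitness_kaing_calander.2.2.1) (pvDiffWitness_kaing_calander.2.2.2) ∧ kaing_calander (pvDiffWitness_kaing_calander.1) (pvDiffWitness_kaing_calander.2.1) (pvDiffWitness_kaing_calander.2.2.1) (pvDiffWitness_kaing_calander.2.2.2) = pvDiffWitnessOut_kaing_calander.1 ∧ kaing_calander_alt (pvDiffWitness_kaing_calander.1) (pvDiffWitness_kaing_calander.2.1) (pvDiffWitness_kaing_calander.2.2.1)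 (pvDiffWitness_kaing_calander.2.2.2) = pvDiffWitnessOut_kaing_calander.2 ∧ pvDiffWitnessOut_kaing_calander.1 ≠ pvDiffWitnessOut_kaing_calander.2
def Claim_exact_kaing_calander : Prop := ∀ (M : Int) (N : Int) (x : Int) (y : Int), Dom_kaing_calander M N x y → Pre_kaing_calander M N x y → D_kaing_calander M N x y → kaing_calander M N x y ≠ kaing_calander_alt M N x y

-- ===== LEMMAS AND PROOFS =====

-- "day k shows (x, y)": the state after k-1 increments is ((k-1)%M+1, (k-1)%N+1).
def pvC (M N x y k : Int) : Prop := (k-1) % M = x - 1 ∧ (k-1) % N = y - 1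

-- abbreviation for lcm as an Int
def pvL (M N : Int) : Int := (Int.lcm M N : Int)

theorem pvL_pos {M N : Int} (hM : 1 ≤ M) (hN : 1 ≤ N) : 1 ≤ pvL M N := by
  unfold pvL Int.lcm
  have h : 0 < Nat.lcm M.natAbs N.natAbs :=
    Nat.lcm_pos (Int.natAbs_pos.mpr (by omega)) (Int.natAbs_pos.mpr (by omega))
  exact_mod_cast h

theorem pvL_dvd_left {M N : Int} : M ∣ pvL M N := Int.dvd_lcm_left M N
theorem pvL_dvd_right {M N : Int} : N ∣ pvL M N := Int.dvd_lcm_right M N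
theorem pvL_dvd {M N c : Int} (h1 : M ∣ c) (h2 : N ∣ c) : pvL M N ∣ c := Int.coe_lcm_dvd h1 h2
theorem pvL_le_mul {M N : Int} (hM : 1 ≤ M) (hN : 1 ≤ N) : pvL M N ≤ M * N :=
  Int.le_of_dvd (by positivity) (pvL_dvd (dvd_mul_right M N) (dvd_mul_left N M))

-- (k-1) % m = a-1  ↔  m ∣ (k - a), for a in range
theorem pvMod_char {m a k : Int} (hm : 1 ≤ m) (h1 : 1 ≤ a) (h2 : a ≤ m) :
    (k-1) % m = a - 1 ↔ m ∣ (k - a) := by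
  have h0 : (a-1) % m = a - 1 := Int.emod_eq_of_lt (by omega) (by omega)
  rw [← h0, Int.emod_eq_emod_iff_emod_sub_eq_zero, show k - 1 - (a-1) = k - a by ring,
    EuclideanDomain.mod_eq_zero]

-- the wrap-around increment is the successor mod m
theorem pvStep {m c : Int} (hm : 1 ≤ m) :
    (if (c-1) % m + 1 < m then (c-1) % m + 1 + 1 else 1) = c % m + 1 := by
  have h0 : 0 ≤ (c-1) % m := Int.emod_nonneg _ (by omega)
  have h2 : c % m = ((c-1) % m + 1) % m := by
    rw [Int.emod_eq_emod_iff_emod_sub_eq_zero, show c - ((c-1) % m + 1) = (c-1) - (c-1) % m by ring,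
      EuclideanDomain.mod_eq_zero]
    exact Int.dvd_self_sub_emod
  by_cases h : (c-1) % m + 1 < m
  · rw [if_pos h, h2, Int.emod_eq_of_lt (by omega) h]
  · have h1 : (c-1) % m < m := Int.emod_lt_of_pos _ (by omega)
    rw [if_neg h, h2, show (c-1) % m + 1 = m by omega, Int.emod_self]
    omega

-- pvC forces x (resp. y) in range
theorem pvC_range {M N x y k : Int} (hM : 1 ≤ M) (hN : 1 ≤ N) (h : pvC M N x y k) :
    1 ≤ x ∧ x ≤ M ∧ 1 ≤ y ∧ y ≤ N := by
  obtain ⟨h1, h2⟩ := h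
  have a1 : 0 ≤ (k-1) % M := Int.emod_nonneg _ (by omega)
  have a2 : (k-1) % M < M := Int.emod_lt_of_pos _ (by omega)
  have b1 : 0 ≤ (k-1) % N := Int.emod_nonneg _ (by omega)
  have b2 : (k-1) % N < N := Int.emod_lt_of_pos _ (by omega)
  omega

-- (c-1)%M = M-1 ∧ (c-1)%N = N-1  ↔  lcm ∣ c
theorem pvExit_iff {M N c : Int} (hM : 1 ≤ M) (hN : 1 ≤ N) :
    ((c-1) % M + 1 = M ∧ (c-1) % N + 1 = N) ↔ pvL M N ∣ c := by
  have key : ∀ m : Int, 1 ≤ m → ((c-1) % m + 1 = m ↔ m ∣ c) := by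
    intro m hm
    rw [show ((c-1) % m + 1 = m) ↔ ((c-1) % m = m - 1) by omega, pvMod_char hm hm le_rfl]
    exact dvd_sub_self_right
  rw [key M hM, key N hN]
  constructor
  · rintro ⟨h1, h2⟩; exact pvL_dvd h1 h2
  · intro h; exact ⟨dvd_trans pvL_dvd_left h, dvd_trans pvL_dvd_right h⟩

-- A's loop, no hit in (c, L]: runs to day L and returns (L, M, N)
theorem loopA_none {M N x y : Int} (hM : 1 ≤ M) (hN : 1 ≤ N) :
    ∀ (fuel : Nat) (c : Int), 1 ≤ c → c ≤ pvL M N → pvL M N ≤ c + (fuel : Int) →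
    (∀ k, c < k → k ≤ pvL M N → ¬ pvC M N x y k) →
    kaingLoopA M N x y fuel c ((c-1) % M + 1) ((c-1) % N + 1) = (pvL M N, M, N) := by
  intro fuel
  induction fuel with
  | zero =>
    intro c h1 h2 h3 _
    have hc : c = pvL M N := by simp at h3; omega
    subst hc
    obtain ⟨e1, e2⟩ := (pvExit_iff hM hN).mpr (dvd_refl (pvL M N))
    simp [kaingLoopA, e1, e2]
  | succ fuel ih =>
    intro c h1 h2 h3 h4
    by_cases hc : pvL M N ∣ c
    · have hceq : c = pvL M N := le_antisymm h2 (Int.le_of_dvd (by omega) hc)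
      subst hceq
      obtain ⟨e1, e2⟩ := (pvExit_iff hM hN).mpr (dvd_refl (pvL M N))
      simp [kaingLoopA, e1, e2]
    · have hlt : c < pvL M N := lt_of_le_of_ne h2 (fun h => hc (h ▸ dvd_refl _))
      rw [kaingLoopA, if_neg (fun hab => hc ((pvExit_iff hM hN).mp hab))]
      simp only [pvStep hM, pvStep hN]
      have hnb : ¬ (c % M + 1 = x ∧ c % N + 1 = y) := by
        intro ⟨e1, e2⟩
        exact h4 (c+1) (by omega) (by omega)
          ⟨by rw [show c + 1 - 1 = c by ring]; omega, by rw [show c + 1 - 1 = c by ring]; omega⟩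
      rw [if_neg hnb]
      have := ih (c+1) (by omega) (by omega) (by push_cast at h3 ⊢; omega)
        (fun k hk1 hk2 => h4 k (by omega) hk2)
      rw [show c + 1 - 1 = c by ring] at this
      exact this

-- A's loop, first hit at k0 ∈ (c, L]: returns (k0, x, y)
theorem loopA_found {M N x y : Int} (hM : 1 ≤ M) (hN : 1 ≤ N) :
    ∀ (fuel : Nat) (c k0 : Int), 1 ≤ c → c < k0 → k0 ≤ pvL M N → pvL M N ≤ c + (fuel : Int) →
    pvC M N x y k0 → (∀ k, c < k → k < k0 → ¬ pvC M N x y k) →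
    kaingLoopA M N x y fuel c ((c-1) % M + 1) ((c-1) % N + 1) = (k0, x, y) := by
  intro fuel
  induction fuel with
  | zero => intro c k0 h1 h2 h3 h4 _ _; simp at h4; omega
  | succ fuel ih =>
    intro c k0 h1 h2 h3 h4 hC hmin
    have hlt : c < pvL M N := by omega
    have hc : ¬ pvL M N ∣ c := fun h => by have := Int.le_of_dvd (by omega) h; omega
    rw [kaingLoopA, if_neg (fun hab => hc ((pvExit_iff hM hN).mp hab))]
    simp only [pvStep hM, pvStep hN]
    by_cases he : c + 1 = k0
    · have e1 : c % M + 1 = x := by have := hC.1; rw [← he, show c + 1 - 1 = c by ring] at this; omega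
      have e2 : c % N + 1 = y := by have := hC.2; rw [← he, show c + 1 - 1 = c by ring] at this; omega
      rw [if_pos ⟨e1, e2⟩, e1, e2, he]
    · have hnb : ¬ (c % M + 1 = x ∧ c % N + 1 = y) := by
        intro ⟨e1, e2⟩
        exact hmin (c+1) (by omega) (by omega)
          ⟨by rw [show c + 1 - 1 = c by ring]; omega, by rw [show c + 1 - 1 = c by ring]; omega⟩
      rw [if_neg hnb]
      have := ih (c+1) k0 (by omega) (by omega) h3 (by push_cast at h4 ⊢; omega) hC
        (fun k hk1 hk2 => hmin k (by omega) hk2)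
      rw [show c + 1 - 1 = c by ring] at this
      exact this

theorem A_eq_neg {M N x y : Int} (hM : 1 ≤ M) (hN : 1 ≤ N) (hL : 2 ≤ pvL M N)
    (h : ∀ k, 2 ≤ k → k ≤ pvL M N → ¬ pvC M N x y k) :
    kaing_calander M N x y = -1 := by
  have hMN : 0 ≤ M * N := by positivity
  have e := loopA_none hM hN (x := x) (y := y) ((M*N).toNat + 1) 1 (le_refl 1)
    (pvL_pos hM hN) (by push_cast; rw [Int.toNat_of_nonneg hMN]; have := pvL_le_mul hM hN; omega)
    (fun k hk1 hk2 => h k (by omega) hk2)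
  have e' : kaingLoopA M N x y ((M*N).toNat + 1) 1 1 1 = (pvL M N, M, N) := by
    simpa using e
  unfold kaing_calander
  rw [e']
  have hnC : ¬ (M = x ∧ N = y) := by
    rintro ⟨rfl, rfl⟩
    refine h (pvL M N) hL le_rfl ⟨?_, ?_⟩
    · have := (pvMod_char hM hM le_rfl (k := pvL M N)).mpr (dvd_sub pvL_dvd_left (dvd_refl M))
      omega
    · have := (pvMod_char hN hN le_rfl (k := pvL M N)).mpr (dvd_sub pvL_dvd_right (dvd_refl N))
      omega
  simp [hnC]

theorem A_eq_found {M N x y k0 : Int} (hM : 1 ≤ M) (hN : 1 ≤ N)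
    (h1 : 2 ≤ k0) (h2 : k0 ≤ pvL M N) (hC : pvC M N x y k0)
    (hmin : ∀ k, 1 < k → k < k0 → ¬ pvC M N x y k) :
    kaing_calander M N x y = k0 := by
  have hMN : 0 ≤ M * N := by positivity
  have e := loopA_found hM hN ((M*N).toNat + 1) 1 k0 (le_refl 1) (by omega) h2
    (by push_cast; rw [Int.toNat_of_nonneg hMN]; have := pvL_le_mul hM hN; omega)
    hC (fun k hk1 hk2 => hmin k hk1 hk2)
  have e' : kaingLoopA M N x y ((M*N).toNat + 1) 1 1 1 = (k0, x, y) := by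
    simpa using e
  unfold kaing_calander
  rw [e']
  simp

theorem A_one_one (x y : Int) : kaing_calander 1 1 x y = if 1 = x ∧ 1 = y then 1 else -1 := by
  norm_num [kaing_calander, kaingLoopA]

-- B's loop characterizations
theorem loopB_none {M N y : Int} (hN : 1 ≤ N) :
    ∀ (n : Nat) (k : Int), (∀ i : Nat, i < n → ¬ ((k + (i : Int) * M - y) % N = 0)) →
    kaingLoopB M N y n k = -1 := by
  intro n
  induction n with
  | zero => intro k _; rfl
  | succ n ih =>
    intro k h
    rw [kaingLoopB, PySem.Int.mod_eq_emod_of_pos (by omega)]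
    rw [if_neg (by have := h 0 (Nat.succ_pos n); simpa using this)]
    refine ih (k + M) (fun i hi => ?_)
    have := h (i+1) (by omega)
    push_cast at this
    rw [show k + ((i:Int)+1) * M - y = k + M + (i:Int) * M - y by ring] at this
    simpa using this

theorem loopB_found {M N y : Int} (hN : 1 ≤ N) :
    ∀ (n : Nat) (k : Int) (i0 : Nat), i0 < n → (k + (i0 : Int) * M - y) % N = 0 →
    (∀ i : Nat, i < i0 → ¬ ((k + (i : Int) * M - y) % N = 0)) →
    kaingLoopB M N y n k = k + (i0 : Int) * M := by
  intro n
  induction n with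
  | zero => intro k i0 h; omega
  | succ n ih =>
    intro k i0 hlt hQ hmin
    rw [kaingLoopB, PySem.Int.mod_eq_emod_of_pos (by omega)]
    by_cases h0 : (k - y) % N = 0
    · rw [if_pos h0]
      have : i0 = 0 := by
        by_contra hne
        exact hmin 0 (by omega) (by simpa using h0)
      simp [this]
    · rw [if_neg h0]
      obtain ⟨j, rfl⟩ : ∃ j, i0 = j + 1 := by
        cases i0 with
        | zero => exact absurd (by simpa using hQ) h0
        | succ j => exact ⟨j, rfl⟩
      have := ih (k + M) j (by omega)
        (by push_cast at hQ
            rw [show k + M + (j:Int) * M - y = k + ((j:Int)+1) * M - y by ring]; exact hQ)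
        (fun i hi => by
          have := hmin (i+1) (by omega)
          push_cast at this
          rw [show k + ((i:Int)+1) * M - y = k + M + (i:Int) * M - y by ring] at this
          simpa using this)
      rw [this]; push_cast; ring

-- ===== VERDICT (by name: the statement is the Claim_ definition above) =====
theorem kaing_calander_spec : Claim_unchanged_kaing_calander := by
  intro M N x y _ hPre hnD
  obtain ⟨hM, hN⟩ := hPre
  show kaing_calander M N x y = kaing_calander_alt M N x y
  by_cases h11 : M = 1 ∧ N = 1
  · obtain ⟨rfl, rfl⟩ := h11
    by_cases hin : 1 ≤ x ∧ x ≤ 1 ∧ 1 ≤ y ∧ y ≤ 1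
    · obtain ⟨rfl, rfl⟩ : x = 1 ∧ y = 1 := by omega
      decide
    · rw [A_one_one]
      unfold kaing_calander_alt
      rw [if_neg hin, if_neg (by omega)]
  · have hne : M ≠ 1 ∨ N ≠ 1 := by tauto
    have hL1 := pvL_pos hM hN
    have hML : M ≤ pvL M N := Int.le_of_dvd (by omega) pvL_dvd_left
    have hNL : N ≤ pvL M N := Int.le_of_dvd (by omega) pvL_dvd_right
    have hL2 : 2 ≤ pvL M N := by omega
    have hLMN := pvL_le_mul hM hN
    by_cases hin : 1 ≤ x ∧ x ≤ M ∧ 1 ≤ y ∧ y ≤ N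
    · by_cases hex : ∃ i : Nat, i < N.toNat ∧ (x + (i : Int) * M - y) % N = 0
      · classical
        have hi0 := Nat.find_spec hex
        set i0 := Nat.find hex with hi0def
        have hminP : ∀ i : Nat, i < i0 → ¬ ((x + (i : Int) * M - y) % N = 0) := by
          intro i hi hP
          exact Nat.find_min hex hi ⟨by omega, hP⟩
        set k0 : Int := x + (i0 : Int) * M with hk0def
        have hi0M : 0 ≤ (i0 : Int) * M := by positivity
        have hMk : M ∣ k0 - x := ⟨(i0 : Int), by rw [hk0def]; ring⟩
        have hNk : N ∣ k0 - y := EuclideanDomain.mod_eq_zero.mp hi0.2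
        have hC : pvC M N x y k0 :=
          ⟨(pvMod_char hM hin.1 hin.2.1).mpr hMk, (pvMod_char hN hin.2.2.1 hin.2.2.2).mpr hNk⟩
        have hk02 : 2 ≤ k0 := by
          rcases lt_or_ge k0 2 with hlt | hge
          · exfalso
            have hk01 : k0 = 1 := by omega
            have hx1 : x = 1 ∧ (i0 : Int) * M = 0 := by omega
            have hy1 : y = 1 := by
              have hdvd : N ∣ 1 - y := by
                rw [← hk01]; exact hNk
              have := Int.eq_zero_of_abs_lt_dvd hdvd (by rw [abs_lt]; omega)
              omega
            exact hnD ⟨hx1.1, hy1, h11⟩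
          · exact hge
        have hk0L : k0 ≤ pvL M N := by
          by_contra hgt
          push_neg at hgt
          set k' : Int := k0 - pvL M N with hk'def
          have hMk' : M ∣ k' - x := by
            rw [hk'def, show k0 - pvL M N - x = (k0 - x) - pvL M N by ring]
            exact dvd_sub hMk pvL_dvd_left
          obtain ⟨j', hj'⟩ := hMk'
          have hj'0 : 0 ≤ j' := by nlinarith
          have hjlt : j' < (i0 : Int) := by nlinarith
          have hNk' : N ∣ k' - y := by
            rw [hk'def, show k0 - pvL M N - y = (k0 - y) - pvL M N by ring]
            exact dvd_sub hNk pvL_dvd_right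
          refine hminP j'.toNat (by omega) ?_
          rw [show x + (j'.toNat : Int) * M - y = k' - y by
            rw [Int.toNat_of_nonneg hj'0]; linear_combination -hj']
          exact EuclideanDomain.mod_eq_zero.mpr hNk'
        have hAmin : ∀ k, 1 < k → k < k0 → ¬ pvC M N x y k := by
          intro k hk1 hkk0 hC'
          have hMk2 : M ∣ k - x := (pvMod_char hM hin.1 hin.2.1).mp hC'.1
          have hNk2 : N ∣ k - y := (pvMod_char hN hin.2.2.1 hin.2.2.2).mp hC'.2
          obtain ⟨j', hj'⟩ := hMk2
          have hj'0 : 0 ≤ j' := by nlinarith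
          have hjlt : j' < (i0 : Int) := by nlinarith
          refine hminP j'.toNat (by omega) ?_
          rw [show x + (j'.toNat : Int) * M - y = k - y by
            rw [Int.toNat_of_nonneg hj'0]; linear_combination -hj']
          exact EuclideanDomain.mod_eq_zero.mpr hNk2
        rw [A_eq_found hM hN hk02 hk0L hC hAmin]
        unfold kaing_calander_alt
        rw [if_pos hin, loopB_found hN N.toNat x i0 hi0.1 hi0.2 hminP]
      · push_neg at hex
        have hB : kaing_calander_alt M N x y = -1 := by
          unfold kaing_calander_alt
          rw [if_pos hin, loopB_none hN N.toNat x (fun i hi hP => hex i hi hP)]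
        rw [hB]
        refine A_eq_neg hM hN hL2 (fun k hk2 hkL hC' => ?_)
        have hMk2 : M ∣ k - x := (pvMod_char hM hin.1 hin.2.1).mp hC'.1
        have hNk2 : N ∣ k - y := (pvMod_char hN hin.2.2.1 hin.2.2.2).mp hC'.2
        obtain ⟨j', hj'⟩ := hMk2
        have hj'0 : 0 ≤ j' := by nlinarith
        have hjlt : j' < N := by nlinarith
        refine hex j'.toNat (by omega) ?_
        rw [show x + (j'.toNat : Int) * M - y = k - y by
          rw [Int.toNat_of_nonneg hj'0]; linear_combination -hj']
        exact EuclideanDomain.mod_eq_zero.mpr hNk2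
    · have hB : kaing_calander_alt M N x y = -1 := by
        unfold kaing_calander_alt; rw [if_neg hin]
      rw [hB]
      exact A_eq_neg hM hN hL2 (fun k _ _ hC' => hin (pvC_range hM hN hC'))

theorem kaing_calander_changed : Claim_changed_kaing_calander := by
  unfold Claim_changed_kaing_calander; decide

theorem kaing_calander_tight : Claim_exact_kaing_calander := by
  intro M N x y _ hPre hD
  obtain ⟨hM, hN⟩ := hPre
  obtain ⟨rfl, rfl, h11⟩ := hD
  have hne : M ≠ 1 ∨ N ≠ 1 := by tauto
  have hL1 := pvL_pos hM hN
  have hML : M ≤ pvL M N := Int.le_of_dvd (by omega) pvL_dvd_left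
  have hNL : N ≤ pvL M N := Int.le_of_dvd (by omega) pvL_dvd_right
  have hL2 : 2 ≤ pvL M N := by omega
  have hA : kaing_calander M N 1 1 = -1 := by
    refine A_eq_neg hM hN hL2 (fun k hk2 hkL hC' => ?_)
    have hMk : M ∣ k - 1 := by
      have := hC'.1; rw [show (1:Int) - 1 = 0 by ring] at this
      exact Int.dvd_of_emod_eq_zero this
    have hNk : N ∣ k - 1 := by
      have := hC'.2; rw [show (1:Int) - 1 = 0 by ring] at this
      exact Int.dvd_of_emod_eq_zero this
    have := Int.le_of_dvd (by omega) (pvL_dvd hMk hNk)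
    omega
  have hB : kaing_calander_alt M N 1 1 = 1 := by
    unfold kaing_calander_alt
    rw [if_pos (by omega)]
    obtain ⟨n, hn⟩ : ∃ n, N.toNat = n + 1 := ⟨N.toNat - 1, by omega⟩
    rw [hn, kaingLoopB, PySem.Int.mod_eq_emod_of_pos (by omega)]
    norm_num
  rw [hA, hB]
  decide
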